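-- pv_equiv track=rewrite | github.com/mprpic/mdlint | src/mdlint/rules/md060.py | _split_cells
-- ===== SOURCE A (Python) =====
-- def _split_cells(line: str) -> tuple[list[str], bool, bool]:
--     """Split a table line into trimmed cell contents.
--
--     Returns:
--         Tuple of (cells, has_leading_pipe, has_trailing_pipe).
--     """
--     stripped = line.strip()
--     has_leading = stripped.startswith("|")
--     has_trailing = len(stripped) > 1 and stripped.endswith("|")
--
--     cells: list[str] = []
--     current: list[str] = []
--     i = 0
--     while i < len(stripped):
--         if stripped[i] == "\\" and i + 1 < len(stripped) and stripped[i + 1] == "|":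
--             current.append("\\|")
--             i += 2
--         elif stripped[i] == "|":
--             cells.append("".join(current))
--             current = []
--             i += 1
--         else:
--             current.append(stripped[i])
--             i += 1
--     cells.append("".join(current))
--
--     # Remove empty entries from leading/trailing pipes
--     if has_leading and cells and cells[0].strip() == "":
--         cells = cells[1:]
--     if has_trailing and cells and cells[-1].strip() == "":
--         cells = cells[:-1]
--
--     cells = [c.strip() for c in cells]
--     return cells, has_leading, has_trailing
-- ===== SOURCE B (Python) =====
-- def _split_cells(line: str) -> tuple[list[str], bool, bool]:
--     """Split a table line into trimmed cell contents.
--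
--     Right-to-left splitter: a '|' tentatively opens a new cell; a '\\' seen
--     immediately to its left undoes that split, keeping '\\|' literal.
--     """
--     stripped = line.strip()
--     has_leading = stripped.startswith("|")
--     has_trailing = len(stripped) > 1 and stripped.endswith("|")
--
--     cells = [""]
--     just_split = False
--     for ch in reversed(stripped):
--         if ch == "|":
--             cells.insert(0, "")
--             just_split = True
--         elif ch == "\\" and just_split:
--             cells = ["\\|" + cells[1]] + cells[2:]
--             just_split = False
--         else:
--             cells[0] = ch + cells[0]
--             just_split = False
--
--     if has_leading and cells[0].strip() == "":
--         cells = cells[1:]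
--     if has_trailing and cells and cells[-1].strip() == "":
--         cells = cells[:-1]
--     return [c.strip() for c in cells], has_leading, has_trailing
-- ===== Notes on version B (the rewrite author's own statement) =====
-- stated objective: alternative
-- what changed: Replaces A's left-to-right scanner with two-char lookahead and an explicit current-cell buffer by a right-to-left fold that tentatively splits at every pipe and undoes the split (merging the two front cells around a literal escaped pipe) when the character to its left is a backslash.
import Mathlib
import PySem

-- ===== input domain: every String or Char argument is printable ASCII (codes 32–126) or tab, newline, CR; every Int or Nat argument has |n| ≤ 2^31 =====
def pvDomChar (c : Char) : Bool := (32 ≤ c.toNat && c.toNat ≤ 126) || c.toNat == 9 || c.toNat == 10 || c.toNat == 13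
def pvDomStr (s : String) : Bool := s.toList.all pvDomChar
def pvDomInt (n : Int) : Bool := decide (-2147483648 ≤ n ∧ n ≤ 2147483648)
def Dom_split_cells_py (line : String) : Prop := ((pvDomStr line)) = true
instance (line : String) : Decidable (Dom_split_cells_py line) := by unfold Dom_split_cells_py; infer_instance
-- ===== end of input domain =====

-- B replaces A's left-to-right scanner (two-char lookahead, explicit current-cell buffer)
-- with a right-to-left fold that tentatively splits at every '|' and undoes the split when
-- the char to its left turns out to be '\'; objective: alternative (same cost, different traversal).

-- ===== PORT A =====
-- A's while loop over `stripped`; `current` accumulated as chars ("".join = String.ofList)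
def splitCellsLoopA : List Char → List Char → List (List Char) → List (List Char)
  | [], cur, cells => cells ++ [cur]
  | '\\' :: '|' :: rest, cur, cells => splitCellsLoopA rest (cur ++ ['\\', '|']) cells
  | '|' :: rest, cur, cells => splitCellsLoopA rest [] (cells ++ [cur])
  | c :: rest, cur, cells => splitCellsLoopA rest (cur ++ [c]) cells

def split_cells_py (line : String) : List String × Bool × Bool :=
  let stripped := PySem.Chars.strip line.toList
  let hasLeading := PySem.Chars.startswith stripped ['|']
  let hasTrailing := decide (1 < stripped.length) && PySem.Chars.endswith stripped ['|']
  let cells0 := splitCellsLoopA stripped [] []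
  let cells1 := if hasLeading = true ∧ cells0 ≠ [] ∧ PySem.Chars.strip (cells0.headD []) = []
                then cells0.tail else cells0
  let cells2 := if hasTrailing = true ∧ cells1 ≠ [] ∧ PySem.Chars.strip (cells1.getLastD []) = []
                then cells1.dropLast else cells1
  (cells2.map (fun c => String.ofList (PySem.Chars.strip c)), hasLeading, hasTrailing)

-- ===== PORT B =====
-- one step of B's right-to-left loop; whenever justSplit holds, cells has ≥ 2 entries
-- (Python indexes cells[1] there), so getD/drop are exact
def splitCellsStepB (ch : Char) : List (List Char) × Bool → List (List Char) × Bool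
  | (cells, justSplit) =>
    if ch = '|' then ([] :: cells, true)
    else if ch = '\\' ∧ justSplit = true then
      ((['\\', '|'] ++ cells.getD 1 []) :: cells.drop 2, false)
    else
      ((ch :: cells.headD []) :: cells.tail, false)

def split_cells_py_alt (line : String) : List String × Bool × Bool :=
  let stripped := PySem.Chars.strip line.toList
  let hasLeading := PySem.Chars.startswith stripped ['|']
  let hasTrailing := decide (1 < stripped.length) && PySem.Chars.endswith stripped ['|']
  let cells0 := (stripped.reverse.foldl (fun st ch => splitCellsStepB ch st) ([[]], false)).1
  let cells1 := if hasLeading = true ∧ PySem.Chars.strip (cells0.headD []) = []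
                then cells0.tail else cells0
  let cells2 := if hasTrailing = true ∧ cells1 ≠ [] ∧ PySem.Chars.strip (cells1.getLastD []) = []
                then cells1.dropLast else cells1
  (cells2.map (fun c => String.ofList (PySem.Chars.strip c)), hasLeading, hasTrailing)

-- ===== PRECONDITION & SPEC =====
def Spec_split_cells_py (line : String) (out : List String × Bool × Bool) : Prop := out = split_cells_py_alt line
instance (line : String) (out : List String × Bool × Bool) : Decidable (Spec_split_cells_py line out) := by unfold Spec_split_cells_py; infer_instance

-- ===== CLAIM (what is proved, stated in full; the proofs are below) =====
def Claim_equal_split_cells_py : Prop := ∀ (line : String), Dom_split_cells_py line → Spec_split_cells_py line (split_cells_py line)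

-- ===== LEMMAS AND PROOFS =====

def mapHead (f : List Char → List Char) : List (List Char) → List (List Char)
  | [] => []
  | h :: t => f h :: t

-- reference splitter both ports are reduced to
def pureSplit : List Char → List (List Char)
  | [] => [[]]
  | '\\' :: '|' :: rest => mapHead (fun x => '\\' :: '|' :: x) (pureSplit rest)
  | '|' :: rest => [] :: pureSplit rest
  | c :: rest => mapHead (fun x => c :: x) (pureSplit rest)

def headIsPipe : List Char → Bool
  | [] => false
  | c :: _ => c == '|'

theorem mapHead_ne_nil (f : List Char → List Char) (l : List (List Char)) (h : l ≠ []) :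
    mapHead f l ≠ [] := by
  cases l <;> simp_all [mapHead]

theorem pureSplit_default (c : Char) (rest : List Char)
    (h1 : ∀ r, c = '\\' → rest = '|' :: r → False) (h2 : c = '|' → False) :
    pureSplit (c :: rest) = mapHead (fun x => c :: x) (pureSplit rest) := by
  rw [pureSplit.eq_def]
  split
  · simp_all
  · rename_i r heq; injection heq with h3 h4; exact (h1 r h3 h4).elim
  · rename_i heq; injection heq with h3 h4; exact (h2 h3).elim
  · rename_i c' r' heq; injection heq with h3 h4; subst h3; subst h4; rfl

theorem pureSplit_ne_nil (cs : List Char) : pureSplit cs ≠ [] := by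
  induction cs using pureSplit.induct with
  | case1 => simp [pureSplit]
  | case2 rest ih => rw [pureSplit]; exact mapHead_ne_nil _ _ ih
  | case3 rest ih => simp [pureSplit]
  | case4 c rest h1 h2 ih => rw [pureSplit_default c rest h1 h2]; exact mapHead_ne_nil _ _ ih

theorem loopA_default (c : Char) (rest cur : List Char) (cells : List (List Char))
    (h1 : ∀ r, c = '\\' → rest = '|' :: r → False) (h2 : c = '|' → False) :
    splitCellsLoopA (c :: rest) cur cells = splitCellsLoopA rest (cur ++ [c]) cells := by
  rw [splitCellsLoopA.eq_def]
  split
  · simp_all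
  · rename_i heq; injection heq with h3 h4; exact (h1 _ h3 h4).elim
  · rename_i heq; injection heq with h3 h4; exact (h2 h3).elim
  · rename_i c' r' _ _ heq; injection heq with h3 h4; subst h3; subst h4; rfl

theorem loopA_eq (cs : List Char) : ∀ (cur : List Char) (cells : List (List Char)),
    splitCellsLoopA cs cur cells = cells ++ mapHead (fun x => cur ++ x) (pureSplit cs) := by
  induction cs using pureSplit.induct with
  | case1 => intro cur cells; simp [splitCellsLoopA, pureSplit, mapHead]
  | case2 rest ih =>
      intro cur cells
      rw [splitCellsLoopA, ih, pureSplit]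
      cases h : pureSplit rest with
      | nil => exact (pureSplit_ne_nil rest h).elim
      | cons hd tl => simp [mapHead]
  | case3 rest ih =>
      intro cur cells
      rw [splitCellsLoopA, ih, pureSplit]
      cases h : pureSplit rest with
      | nil => exact (pureSplit_ne_nil rest h).elim
      | cons hd tl => simp [mapHead]
  | case4 c rest h1 h2 ih =>
      intro cur cells
      rw [loopA_default c rest cur cells h1 h2, ih, pureSplit_default c rest h1 h2]
      cases h : pureSplit rest with
      | nil => exact (pureSplit_ne_nil rest h).elim
      | cons hd tl => simp [mapHead]

theorem foldrB_eq (cs : List Char) :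
    List.foldr splitCellsStepB ([[]], false) cs = (pureSplit cs, headIsPipe cs) := by
  induction cs with
  | nil => simp [pureSplit, headIsPipe]
  | cons c rest ih =>
      rw [List.foldr_cons, ih]
      by_cases hc : c = '|'
      · subst hc; simp [splitCellsStepB, pureSplit, headIsPipe]
      · by_cases hb : c = '\\'
        · subst hb
          cases rest with
          | nil => simp [splitCellsStepB, pureSplit, headIsPipe, mapHead]
          | cons r rs =>
            by_cases hr : r = '|'
            · subst hr
              cases h : pureSplit rs with
              | nil => exact (pureSplit_ne_nil rs h).elim
              | cons hd tl => simp [splitCellsStepB, pureSplit, headIsPipe, mapHead, h]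
            · rw [pureSplit_default '\\' (r :: rs) (fun x h1 h2 => (hr (List.cons.inj h2).1).elim) (fun h => absurd h (by decide))]
              cases h : pureSplit (r :: rs) with
              | nil => exact (pureSplit_ne_nil _ h).elim
              | cons hd tl => simp [splitCellsStepB, headIsPipe, mapHead, hr]
        · rw [pureSplit_default c rest (fun r h1 _ => hb h1) (fun h => hc h)]
          cases h : pureSplit rest with
          | nil => exact (pureSplit_ne_nil _ h).elim
          | cons hd tl => simp [splitCellsStepB, headIsPipe, mapHead, hc, hb]

-- ===== VERDICT (by name: the statement is the Claim_ definition above) =====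
theorem split_cells_py_spec : Claim_equal_split_cells_py := by
  intro line _
  unfold Spec_split_cells_py split_cells_py split_cells_py_alt
  have hA : splitCellsLoopA (PySem.Chars.strip line.toList) [] []
      = pureSplit (PySem.Chars.strip line.toList) := by
    rw [loopA_eq]
    cases h : pureSplit (PySem.Chars.strip line.toList) with
    | nil => exact (pureSplit_ne_nil _ h).elim
    | cons hd tl => simp [mapHead]
  have hB : ((PySem.Chars.strip line.toList).reverse.foldl
        (fun st ch => splitCellsStepB ch st) ([[]], false)).1
      = pureSplit (PySem.Chars.strip line.toList) := by
    rw [List.foldl_reverse]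
    have : (fun (a : Char) (b : List (List Char) × Bool) => splitCellsStepB a b) = splitCellsStepB := rfl
    rw [show (List.foldr (fun a b => splitCellsStepB a b) (([[]] : List (List Char)), false)
          (PySem.Chars.strip line.toList))
        = List.foldr splitCellsStepB ([[]], false) (PySem.Chars.strip line.toList) from rfl,
      foldrB_eq]
  simp only [hA, hB]
  have hne := pureSplit_ne_nil (PySem.Chars.strip line.toList)
  simp [hne]
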